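-- pv_equiv track=rewrite | github.com/hchandola/Synth_P3_Test_7_2_7 | src/src_gen_30.py | sol307
-- ===== SOURCE A (Python) =====
-- def sol307(size=3, edges=[[0, 17], [0, 22], [17, 22], [17, 31], [22, 31], [31, 17]]):
--     """Find a clique of the given size in the given undirected graph. It is guaranteed that such a clique exists."""
--     # brute force (finds list in increasing order), but with a tiny bit of speedup
--     if size == 0:
--         return []
--     from collections import defaultdict
--     neighbors = defaultdict(set)
--     n = max(max(e) for e in edges)
--     for (a, b) in edges:
--         if a != b:
--             neighbors[a].add(b)
--             neighbors[b].add(a)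
--     pools = [list(range(n + 1))]
--     indices = [-1]
--     while pools:
--         indices[-1] += 1
--         if indices[-1] >= len(pools[-1]) - size + len(pools):  # since list is increasing order
--             indices.pop()
--             pools.pop()
--             continue
--         if len(pools) == size:
--             return [pool[i] for pool, i in zip(pools, indices)]
--         a = (pools[-1])[indices[-1]]
--         pools.append([i for i in pools[-1] if i > a and i in neighbors[a]])
--         indices.append(-1)
--     assert False, f"No clique of size {size}"
-- ===== SOURCE B (Python) =====
-- def sol307(size=3, edges=[[0, 17], [0, 22], [17, 22], [17, 31], [22, 31], [31, 17]]):
--     """Find a clique of the given size in the given undirected graph. It is guaranteed that such a clique exists."""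
--     if size == 0:
--         return []
--     from collections import defaultdict
--     neighbors = defaultdict(set)
--     n = max(max(e) for e in edges)
--     for a, b in edges:
--         if a != b:
--             neighbors[a].add(b)
--             neighbors[b].add(a)
--
--     def extend(clique, pool):
--         if len(clique) == size:
--             return clique
--         for a in pool:
--             r = extend(clique + [a], [i for i in pool if i > a and i in neighbors[a]])
--             if r is not None:
--                 return r
--         return None
--
--     r = extend([], list(range(n + 1)))
--     if r is not None:
--         return r
--     assert False, f"No clique of size {size}"
-- ===== Notes on version B (the rewrite author's own statement) =====
-- stated objective: simpler
-- what changed: A's explicit pools/indices stack machine with an index-arithmetic pruning bound is replaced by a plain recursive first-success helper extend(clique, pool) that tries candidates in ascending order; the pruning is dropped (provably never changes the returned clique).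
import Mathlib
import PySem

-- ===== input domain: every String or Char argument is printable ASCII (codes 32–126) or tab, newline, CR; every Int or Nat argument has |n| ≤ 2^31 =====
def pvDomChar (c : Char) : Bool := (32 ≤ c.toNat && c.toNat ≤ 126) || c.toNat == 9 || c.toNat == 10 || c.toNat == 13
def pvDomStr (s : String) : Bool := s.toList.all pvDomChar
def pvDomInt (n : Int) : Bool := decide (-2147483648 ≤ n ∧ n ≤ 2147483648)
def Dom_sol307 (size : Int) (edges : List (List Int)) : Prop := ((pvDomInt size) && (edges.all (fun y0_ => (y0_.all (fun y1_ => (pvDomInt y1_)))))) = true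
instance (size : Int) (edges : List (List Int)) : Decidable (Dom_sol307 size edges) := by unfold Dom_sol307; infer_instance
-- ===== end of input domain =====

-- B replaces A's explicit pools/indices stack machine (with its remaining-pool-size pruning) by a
-- plain recursive first-success search over the candidate pool; objective: simpler.


-- ===== PORT A =====
-- Shared by both ports (both Pythons build `neighbors` and `n` with identical code):
-- neighbors = defaultdict(set); for (a, b) in edges: if a != b: add both directions.
-- An edge that is not a 2-element list raises ValueError on unpacking in Python (excluded by Pre_);
-- here such an edge is skipped.
def pvNbs (edges : List (List Int)) : PySem.Dict Int (PySem.Set Int) :=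
  edges.foldl (fun d e =>
    match e with
    | [a, b] =>
      if a ≠ b then
        let d1 := PySem.Dict.insert d a (PySem.Set.add (PySem.Dict.getD d a (PySem.Set.ofList [])) b)
        PySem.Dict.insert d1 b (PySem.Set.add (PySem.Dict.getD d1 b (PySem.Set.ofList [])) a)
      else d
    | _ => d) (PySem.Dict.mk [])

-- 'x in neighbors[a]' (defaultdict read of a missing key is the empty set)
def pvNb (edges : List (List Int)) (a x : Int) : Bool :=
  PySem.Set.contains (PySem.Dict.getD (pvNbs edges) a (PySem.Set.ofList [])) x

-- n = max(max(e) for e in edges); Python raises ValueError on an empty edges/edge (excluded by Pre_)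
def pvMaxN (edges : List (List Int)) : Int :=
  (PySem.List.max? (edges.map (fun e => (PySem.List.max? e (fun v => v)).getD 0)) (fun v => v)).getD 0

-- A's while-loop over the pools/indices stacks, stack head = top (Python's pools[-1]/indices[-1]).
-- fuel makes the recursion structural; the caller passes a bound proved sufficient below, so the
-- fuel-0 branch is never reached.  An emptied stack is Python's 'assert False' (excluded by Pre_).
def sol307Loop (size : Int) (nb : Int → Int → Bool) : Nat → List (List Int × Int) → List Int
  | 0, _ => []
  | _ + 1, [] => []
  | fuel + 1, (pool, i) :: rest =>
    let i := i + 1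
    if (pool.length : Int) - size + ((rest.length : Int) + 1) ≤ i then
      sol307Loop size nb fuel rest
    else if (rest.length : Int) + 1 = size then
      ((pool, i) :: rest).reverse.map (fun f => PySem.List.pyGetD f.1 f.2 0)
    else
      let a := PySem.List.pyGetD pool i 0
      sol307Loop size nb fuel
        ((pool.filter (fun x => decide (a < x) && nb a x), -1) :: (pool, i) :: rest)

def sol307 (size : Int) (edges : List (List Int)) : List Int :=
  if size = 0 then []
  else
    let nb := pvNb edges
    let n := pvMaxN edges
    let pool0 := PySem.List.pyRange 0 (n + 1) 1
    sol307Loop size nb ((pool0.length + 1) * (pool0.length + 2) ^ size.toNat + 1) [(pool0, -1)]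

-- ===== PORT B =====
-- B's recursive helper: extend(clique, pool) returns the first (lexicographically smallest)
-- completion of clique using candidates from pool, or None.
def sol307Extend (size : Int) (nb : Int → Int → Bool) (clique pool : List Int) :
    Option (List Int) :=
  if (clique.length : Int) = size then some clique
  else
    pool.attach.findSome? (fun a =>
      sol307Extend size nb (clique ++ [a.1]) (pool.filter (fun x => decide (a.1 < x) && nb a.1 x)))
termination_by pool.length
decreasing_by
  simp only [List.length_unattach]
  rcases (List.length_filter_le (fun x => decide ((a : Int) < x.1) && nb a x.1)
      pool.attach).lt_or_eq with h | h
  · simpa using h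
  · exfalso
    have := (List.length_filter_eq_length_iff.mp h) a (List.mem_attach pool a)
    simp at this

def sol307_alt (size : Int) (edges : List (List Int)) : List Int :=
  if size = 0 then []
  else
    let nb := pvNb edges
    let n := pvMaxN edges
    -- a None result is Python's 'assert False' path (excluded by Pre_)
    (sol307Extend size nb [] (PySem.List.pyRange 0 (n + 1) 1)).getD []

-- ===== PRECONDITION & SPEC =====
-- Pre_ is exactly where Python A returns: size == 0, or else edges is a nonempty list of 2-element
-- edges (otherwise max()/tuple unpacking raises) and a clique of the requested size exists among
-- the vertices 0..n (otherwise A's exhaustive search falls through to 'assert False').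
def Pre_sol307 (size : Int) (edges : List (List Int)) : Prop :=
  size = 0 ∨
    (0 < size ∧ edges ≠ [] ∧ (∀ e ∈ edges, e.length = 2) ∧
      ∃ c ∈ (PySem.List.pyRange 0 (pvMaxN edges + 1) 1).sublistsLen size.toNat,
        c.Pairwise (fun x y => [x, y] ∈ edges ∨ [y, x] ∈ edges))
instance (size : Int) (edges : List (List Int)) : Decidable (Pre_sol307 size edges) := by
  unfold Pre_sol307; infer_instance

def pvWitness_sol307 : Int × List (List Int) := (3, [[0, 1], [0, 2], [1, 2]])

def Spec_sol307 (size : Int) (edges : List (List Int)) (out : List Int) : Prop := out = sol307_alt size edges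
instance (size : Int) (edges : List (List Int)) (out : List Int) : Decidable (Spec_sol307 size edges out) := by unfold Spec_sol307; infer_instance

-- ===== CLAIM (what is proved, stated in full; the proofs are below) =====
def Claim_equal_sol307 : Prop := ∀ (size : Int) (edges : List (List Int)), Dom_sol307 size edges → Pre_sol307 size edges → Spec_sol307 size edges (sol307 size edges)

-- ===== LEMMAS AND PROOFS =====

-- one unfolding of sol307Extend with the attach eliminated
theorem sol307Extend_eq (size : Int) (nb : Int → Int → Bool) (clique pool : List Int) :
    sol307Extend size nb clique pool =
      if (clique.length : Int) = size then some clique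
      else
        pool.findSome? (fun a =>
          sol307Extend size nb (clique ++ [a]) (pool.filter (fun x => decide (a < x) && nb a x))) := by
  rw [sol307Extend]
  split
  · rfl
  · have hfn : (fun (a : {x // x ∈ pool}) => sol307Extend size nb (clique ++ [a.1])
        (pool.filter (fun x => decide (a.1 < x) && nb a.1 x))) =
        (fun a => sol307Extend size nb (clique ++ [a])
          (pool.filter (fun x => decide (a < x) && nb a x))) ∘ Subtype.val := rfl
    rw [hfn, ← List.findSome?_map, List.attach_map_subtype_val]

-- the clique recorded by the stack frames below the top (one chosen vertex per frame)
def pvClique (rest : List (List Int × Int)) : List Int :=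
  rest.reverse.map (fun f => PySem.List.pyGetD f.1 f.2 0)

-- first-success over the candidates pool[j:], as B's extend searches them
def pvTry (size : Int) (nb : Int → Int → Bool) (clique pool : List Int) (j : Nat) :
    Option (List Int) :=
  (pool.drop j).findSome? (fun a =>
    sol307Extend size nb (clique ++ [a]) (pool.filter (fun x => decide (a < x) && nb a x)))

-- what A's machine still can return from a given stack, phrased with B's search
def pvT (size : Int) (nb : Int → Int → Bool) : List (List Int × Int) → Option (List Int)
  | [] => none
  | (p, i) :: rest =>
    match pvTry size nb (pvClique rest) p (i + 1).toNat with
    | some r => some r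
    | none => pvT size nb rest

-- potential of a frame / of a stack (stack listed bottom-first for the potential)
def pvTerm (f : List Int × Int) : Nat := ((f.1.length : Int) - f.2).toNat

def pvPhiAux (W : Nat) : Nat → List (List Int × Int) → Nat
  | _, [] => 0
  | e, f :: t => pvTerm f * W ^ e + pvPhiAux W (e - 1) t

def pvPhi (W sizeN : Nat) (stack : List (List Int × Int)) : Nat :=
  pvPhiAux W sizeN stack.reverse

-- invariant of the non-top stack frames: a valid chosen index
def pvInvMid (N : Nat) (size : Int) : List (List Int × Int) → Prop
  | [] => True
  | f :: rest =>
    (f.1.Pairwise (· < ·) ∧ f.1.length ≤ N ∧ 0 ≤ f.2 ∧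
      f.2 < (f.1.length : Int) - size + ((rest.length : Int) + 1)) ∧
    pvInvMid N size rest

-- invariant of the whole stack (the top frame may still be fresh, index -1)
def pvInv (N : Nat) (size : Int) : List (List Int × Int) → Prop
  | [] => True
  | f :: rest =>
    (f.1.Pairwise (· < ·) ∧ f.1.length ≤ N ∧
      (f.2 = -1 ∨ (0 ≤ f.2 ∧ f.2 < (f.1.length : Int) - size + ((rest.length : Int) + 1)))) ∧
    pvInvMid N size rest

theorem pvPhiAux_append (W : Nat) (l m : List (List Int × Int)) (e : Nat) :
    pvPhiAux W e (l ++ m) = pvPhiAux W e l + pvPhiAux W (e - l.length) m := by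
  induction l generalizing e with
  | nil => simp [pvPhiAux]
  | cons f t ih =>
    simp only [List.cons_append, pvPhiAux, ih (e - 1), List.length_cons]
    have h : e - 1 - t.length = e - (t.length + 1) := by omega
    rw [h]
    omega

-- B finds nothing when the pool is too small to complete the clique
theorem pvExtend_none_of_short (size : Int) (nb : Int → Int → Bool) :
    ∀ (pool clique : List Int), (clique.length : Int) < size →
      (pool.length : Int) < size - clique.length →
      sol307Extend size nb clique pool = none := by
  intro pool
  induction hn : pool.length using Nat.strong_induction_on generalizing pool with
  | _ n ih =>
  intro clique h1 h2
  subst hn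
  rw [sol307Extend_eq, if_neg (by omega)]
  rw [List.findSome?_eq_none_iff]
  intro a ha
  have hlt : (pool.filter (fun x => decide (a < x) && nb a x)).length < pool.length := by
    rcases (List.length_filter_le (fun x => decide (a < x) && nb a x) pool).lt_or_eq with h | h
    · exact h
    · exact absurd ((List.length_filter_eq_length_iff.mp h) a ha) (by simp)
  by_cases hcl : (clique.length : Int) + 1 < size
  · exact ih _ hlt _ rfl (clique ++ [a]) (by simpa using hcl) (by simp; omega)
  · -- then clique.length + 1 = size, so size - clique.length = 1 and the pool is empty
    exfalso
    have : pool = [] := by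
      have : pool.length = 0 := by omega
      simpa using this
    simp [this] at ha

-- elements of the pool from the pruning bound on cannot complete the clique
theorem pvTry_none (size : Int) (nb : Int → Int → Bool) (clique pool : List Int) (j : Nat)
    (hs : pool.Pairwise (· < ·))
    (hd : (clique.length : Int) + 1 ≤ size)
    (hj : (pool.length : Int) - size + ((clique.length : Int) + 1) ≤ (j : Int)) :
    pvTry size nb clique pool j = none := by
  rw [pvTry, List.findSome?_eq_none_iff]
  intro a ha
  obtain ⟨m, hm, hma⟩ : ∃ m, ∃ h : j + m < pool.length, pool[j + m] = a := by
    obtain ⟨m, hm0, hma0⟩ := List.getElem_of_mem ha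
    have hm : j + m < pool.length := by
      have := hm0; simp [List.length_drop] at this; omega
    refine ⟨m, hm, ?_⟩
    rw [← hma0, List.getElem_drop]
  by_cases hcl : (clique.length : Int) + 1 < size
  · -- the filtered pool is a subset of pool[j+m+1:], too short to supply size - |clique| - 1 more
    have htake : (pool.take (j + m + 1)).filter (fun x => decide (a < x) && nb a x) = [] := by
      rw [List.filter_eq_nil_iff]
      intro x hx
      obtain ⟨k, hk, hkx⟩ := List.getElem_of_mem hx
      have hk' : k < pool.length := lt_of_lt_of_le hk (by simp)
      have hxk : pool[k] = x := by
        rw [← hkx, List.getElem_take]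
      have hkle : k ≤ j + m := by
        have := hk; simp [List.length_take] at this; omega
      have hxa : x ≤ a := by
        rcases lt_or_eq_of_le hkle with h | h
        · have hpp := List.pairwise_iff_getElem.mp hs k (j + m) hk' hm h
          rw [hxk, hma] at hpp
          exact le_of_lt hpp
        · subst h
          rw [hxk] at hma
          omega
      have hax : ¬ a < x := by omega
      simp [hax]
    have hle : (pool.filter (fun x => decide (a < x) && nb a x)).length ≤
        pool.length - (j + m + 1) :=
      calc (pool.filter (fun x => decide (a < x) && nb a x)).length
          = ((pool.take (j + m + 1) ++ pool.drop (j + m + 1)).filter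
              (fun x => decide (a < x) && nb a x)).length := by rw [List.take_append_drop]
        _ = ((pool.drop (j + m + 1)).filter (fun x => decide (a < x) && nb a x)).length := by
              rw [List.filter_append, htake]; simp
        _ ≤ (pool.drop (j + m + 1)).length := List.length_filter_le _ _
        _ = pool.length - (j + m + 1) := by simp
    have hlen2 : (pool.filter (fun x => decide (a < x) && nb a x)).length + (j + m + 1) ≤
        pool.length := by omega
    apply pvExtend_none_of_short
    · simpa using hcl
    · have hca : (clique ++ [a]).length = clique.length + 1 := by simp
      push_cast [hca]
      omega
  · -- |clique| + 1 = size forces j ≥ |pool|: no candidate exists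
    exfalso
    omega

theorem pvInvMid_inv (N : Nat) (size : Int) (stack : List (List Int × Int))
    (h : pvInvMid N size stack) : pvInv N size stack := by
  cases stack with
  | nil => trivial
  | cons f rest =>
    obtain ⟨⟨h1, h2, h3, h4⟩, h5⟩ := h
    exact ⟨⟨h1, h2, Or.inr ⟨h3, h4⟩⟩, h5⟩

-- the main simulation: with enough fuel, A's machine computes pvT of its stack
theorem pvMain (size : Int) (nb : Int → Int → Bool) (N sizeN : Nat)
    (hsize : size = (sizeN : Int)) :
    ∀ (fuel : Nat) (stack : List (List Int × Int)), pvInv N size stack →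
      stack.length ≤ sizeN → pvPhi (N + 2) sizeN stack < fuel →
      sol307Loop size nb fuel stack = (pvT size nb stack).getD [] := by
  intro fuel
  induction fuel with
  | zero => intro stack _ _ h; omega
  | succ fuel ih =>
    intro stack hinv hlen hphi
    cases stack with
    | nil => simp [sol307Loop, pvT]
    | cons f rest =>
      obtain ⟨p, i⟩ := f
      obtain ⟨⟨hps, hpN, hi⟩, hmid⟩ := hinv
      -- basic bounds on the top index
      have hi1 : -1 ≤ i := by rcases hi with h | h; omega; omega
      have hibd : i < (p.length : Int) - size + ((rest.length : Int) + 1) ∨ i = -1 := by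
        rcases hi with h | h
        · exact Or.inr h
        · exact Or.inl h.2
      have hW : 2 ≤ N + 2 := by omega
      -- the potential of the stack, split at the top frame
      have hsplit : pvPhi (N + 2) sizeN ((p, i) :: rest) =
          pvPhi (N + 2) sizeN rest + pvTerm (p, i) * (N + 2) ^ (sizeN - rest.length) := by
        simp only [pvPhi, List.reverse_cons, pvPhiAux_append, List.length_reverse, pvPhiAux]
        omega
      rw [sol307Loop]
      split
      · -- POP: all remaining candidates are pruned away, pvT falls through to the rest
        rename_i hpop
        have hmidinv := pvInvMid_inv N size rest hmid
        have hrestlen : rest.length ≤ sizeN := by simp at hlen; omega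
        -- the popped term is ≥ 1: i < p.length
        have hilen : i ≤ (p.length : Int) := by
          rcases hi with h | h
          · subst h
            omega
          · have : (rest.length : Int) + 1 ≤ (sizeN : Int) := by
              have : rest.length + 1 ≤ sizeN := by simpa using hlen
              exact_mod_cast this
            omega
        have hterm : 1 ≤ pvTerm (p, i) := by
          simp only [pvTerm]
          rcases hi with h | h
          · subst h; omega
          · have : (rest.length : Int) + 1 ≤ (sizeN : Int) := by
              have : rest.length + 1 ≤ sizeN := by simpa using hlen
              exact_mod_cast this
            omega
        have hpow : 1 ≤ (N + 2) ^ (sizeN - rest.length) := Nat.one_le_pow _ _ (by omega)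
        have hphir : pvPhi (N + 2) sizeN rest < fuel := by
          have := Nat.le_mul_of_pos_left ((N + 2) ^ (sizeN - rest.length)) (by omega : 0 < pvTerm (p, i))
          omega
        rw [ih rest hmidinv hrestlen hphir]
        -- pvT of the full stack: the top frame yields none
        have hclen : (pvClique rest).length = rest.length := by simp [pvClique]
        have htry : pvTry size nb (pvClique rest) p (i + 1).toNat = none := by
          apply pvTry_none size nb _ p _ hps
          · rw [hclen]
            have : rest.length + 1 ≤ sizeN := by simpa using hlen
            omega
          · rw [hclen]
            have : ((i + 1).toNat : Int) = i + 1 := Int.toNat_of_nonneg (by omega)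
            omega
        simp [pvT, htry]
      · -- not popped: i + 1 is a valid candidate index
        rename_i hnpop
        rw [not_le] at hnpop
        have hiv : 0 ≤ i + 1 ∧ i + 1 < (p.length : Int) - size + ((rest.length : Int) + 1) :=
          ⟨by omega, hnpop⟩
        have hrlen : (rest.length : Int) + 1 ≤ (sizeN : Int) := by
          have : rest.length + 1 ≤ sizeN := by simpa using hlen
          exact_mod_cast this
        have hip : i + 1 < (p.length : Int) := by omega
        have hdrop : p.drop (i + 1).toNat = p[(i + 1).toNat] :: p.drop ((i + 1).toNat + 1) :=
          List.drop_eq_getElem_cons (by omega)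
        have hget : PySem.List.pyGetD p (i + 1) 0 = p[(i + 1).toNat]'(by omega) :=
          PySem.List.pyGetD_eq_getElem p 0 (by omega) hip
        split
        · -- RETURN: the stack is full; the first untried candidate completes the clique
          rename_i hfull
          have hclen : (pvClique rest).length = rest.length := by simp [pvClique]
          have hdone : sol307Extend size nb (pvClique rest ++ [p[(i + 1).toNat]])
              (p.filter (fun x => decide (p[(i + 1).toNat] < x) && nb p[(i + 1).toNat] x)) =
              some (pvClique rest ++ [p[(i + 1).toNat]]) := by
            rw [sol307Extend_eq, if_pos (by simp [hclen]; omega)]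
          have htry : pvTry size nb (pvClique rest) p (i + 1).toNat =
              some (pvClique rest ++ [p[(i + 1).toNat]]) := by
            rw [pvTry, hdrop, List.findSome?_cons, hdone]
          simp only [pvT, htry, Option.getD_some]
          simp [pvClique, hget]
        · -- PUSH: descend into the filtered pool; pvT is unchanged
          rename_i hnfull
          set a := PySem.List.pyGetD p (i + 1) 0 with ha
          set np := p.filter (fun x => decide (a < x) && nb a x) with hnp
          have hnps : np.Pairwise (· < ·) := hps.filter _
          have hnpN : np.length ≤ N := le_trans (List.length_filter_le _ _) hpN
          have hinv' : pvInv N size ((np, -1) :: (p, i + 1) :: rest) :=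
            ⟨⟨hnps, hnpN, Or.inl rfl⟩, ⟨hps, hpN, hiv.1, by simpa using hiv.2⟩, hmid⟩
          have hlen' : ((np, -1) :: (p, i + 1) :: rest).length ≤ sizeN := by
            have : (rest.length : Int) + 1 < (sizeN : Int) := by
              rw [hsize] at hnfull hnpop
              omega
            simp
            omega
          -- potential strictly decreases
          have hphis : pvPhi (N + 2) sizeN ((np, -1) :: (p, i + 1) :: rest) <
              pvPhi (N + 2) sizeN ((p, i) :: rest) := by
            have e2 : 2 ≤ sizeN - rest.length := by
              have : (rest.length : Int) + 1 < (sizeN : Int) := by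
                rw [hsize] at hnfull hnpop
                omega
              have : rest.length + 1 < sizeN := by exact_mod_cast this
              omega
            have hsplit' : pvPhi (N + 2) sizeN ((np, -1) :: (p, i + 1) :: rest) =
                pvPhi (N + 2) sizeN rest +
                  pvTerm (p, i + 1) * (N + 2) ^ (sizeN - rest.length) +
                  pvTerm (np, -1) * (N + 2) ^ (sizeN - rest.length - 1) := by
              simp only [pvPhi, List.reverse_cons, List.append_assoc, pvPhiAux_append,
                List.length_reverse, pvPhiAux, List.length_cons, List.length_nil]
              have hee : sizeN - rest.length - 1 = sizeN - (rest.length + 1) := by omega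
              rw [hee]
              omega
            have hterm1 : pvTerm (p, i) = pvTerm (p, i + 1) + 1 := by
              simp only [pvTerm]
              omega
            have hterm2 : pvTerm (np, -1) ≤ N + 1 := by
              simp only [pvTerm]
              omega
            have hpowlt : pvTerm (np, -1) * (N + 2) ^ (sizeN - rest.length - 1) <
                (N + 2) ^ (sizeN - rest.length) := by
              calc pvTerm (np, -1) * (N + 2) ^ (sizeN - rest.length - 1)
                  < (N + 2) * (N + 2) ^ (sizeN - rest.length - 1) :=
                    (Nat.mul_lt_mul_right (Nat.one_le_pow _ _ (by omega))).mpr (by omega)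
                _ = (N + 2) ^ (sizeN - rest.length) := by
                    rw [← pow_succ']
                    congr 1
                    omega
            rw [hsplit, hsplit', hterm1, Nat.add_mul, one_mul]
            omega
          rw [ih _ hinv' hlen' (by omega)]
          -- now show pvT is preserved by the push
          have hclen : (pvClique rest).length = rest.length := by simp [pvClique]
          have hcl' : pvClique ((p, i + 1) :: rest) = pvClique rest ++ [a] := by
            simp [pvClique, ha]
          -- pvTry of the fresh frame equals B's extend on the pushed pool
          have hfresh : pvTry size nb (pvClique rest ++ [a]) np ((-1 : Int) + 1).toNat =
              sol307Extend size nb (pvClique rest ++ [a]) np := by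
            rw [pvTry]
            have h0 : ((-1 : Int) + 1).toNat = 0 := by norm_num
            rw [h0, List.drop_zero]
            rw [sol307Extend_eq,
              if_neg (by simp only [List.length_append, hclen, List.length_cons, List.length_nil]; push_cast; omega)]
          -- pvTry of the parent frame from i+1 splits off its head candidate
          have hsplitTry : pvTry size nb (pvClique rest) p (i + 1).toNat =
              match sol307Extend size nb (pvClique rest ++ [a]) np with
              | some r => some r
              | none => pvTry size nb (pvClique rest) p ((i + 1) + 1).toNat := by
            rw [pvTry, hdrop, List.findSome?_cons, ← hget, ← hnp]
            have : (i + 1).toNat + 1 = ((i + 1) + 1).toNat := by omega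
            rw [this, pvTry]
            cases sol307Extend size nb (pvClique rest ++ [a]) np <;> rfl
          simp only [pvT, hcl', hfresh, hsplitTry]
          cases sol307Extend size nb (pvClique rest ++ [a]) np <;> rfl

-- ===== VERDICT (by name: the statement is the Claim_ definition above) =====
theorem sol307_spec : Claim_equal_sol307 := by
  intro size edges _ hpre
  unfold Spec_sol307
  rcases hpre with h0 | ⟨hpos, -, -, -⟩
  · simp [sol307, sol307_alt, h0]
  · have hne : ¬ size = 0 := by omega
    rw [sol307, sol307_alt, if_neg hne, if_neg hne]
    set nb := pvNb edges
    set pool0 := PySem.List.pyRange 0 (pvMaxN edges + 1) 1 with hp0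
    have hsize : size = (size.toNat : Int) := (Int.toNat_of_nonneg (by omega)).symm
    have hs1 : 1 ≤ size.toNat := by omega
    have hinv : pvInv pool0.length size [(pool0, -1)] :=
      ⟨⟨PySem.List.pairwise_lt_pyRange_one 0 (pvMaxN edges + 1), le_refl _, Or.inl rfl⟩, trivial⟩
    have hphi : pvPhi (pool0.length + 2) size.toNat [(pool0, -1)] <
        (pool0.length + 1) * (pool0.length + 2) ^ size.toNat + 1 := by
      simp only [pvPhi, List.reverse_cons, List.reverse_nil, List.nil_append, pvPhiAux, pvTerm]
      have : (((pool0.length : Int) - (-1)).toNat) = pool0.length + 1 := by omega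
      rw [this]
      omega
    rw [pvMain size nb pool0.length size.toNat hsize _ _ hinv (by simpa using hs1) hphi]
    -- pvT of the initial stack is exactly B's top-level extend call
    have : pvT size nb [(pool0, -1)] = sol307Extend size nb [] pool0 := by
      have hfresh : pvTry size nb (pvClique []) pool0 ((-1 : Int) + 1).toNat =
          sol307Extend size nb [] pool0 := by
        rw [pvTry]
        have : ((-1 : Int) + 1).toNat = 0 := by norm_num
        rw [this, List.drop_zero]
        rw [sol307Extend_eq, if_neg (by simpa using (by omega : ¬ (0 : Int) = size))]
        simp [pvClique]
      rw [pvT, hfresh]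
      cases sol307Extend size nb [] pool0 <;> rfl
    rw [this]
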